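-- pv_equiv track=rewrite | github.com/righthand0521/LeetCode | src/2486.py | appendCharacters
-- ===== SOURCE A (Python) =====
-- def appendCharacters(s: str, t: str) -> int:
--     retVal = 0
--
--     sSize = len(s)
--     tSize = len(t)
--
--     idxS = 0
--     idxT = 0
--     while (idxS < sSize) and (idxT < tSize):
--         if s[idxS] == t[idxT]:
--             idxT += 1
--         idxS += 1
--     retVal = tSize - idxT
--
--     return retVal
-- ===== SOURCE B (Python) =====
-- def appendCharacters(s: str, t: str) -> int:
--     pos = 0
--     matched = 0
--     for c in t:
--         idx = s.find(c, pos)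
--         if idx == -1:
--             break
--         pos = idx + 1
--         matched += 1
--     return len(t) - matched
-- ===== Notes on version B (the rewrite author's own statement) =====
-- stated objective: faster
-- what changed: B iterates over t (not s), jumping the cursor forward in s with str.find for each character of t, instead of A's per-character while loop over s; the scan over s happens inside the C-level str.find.
import Mathlib
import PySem

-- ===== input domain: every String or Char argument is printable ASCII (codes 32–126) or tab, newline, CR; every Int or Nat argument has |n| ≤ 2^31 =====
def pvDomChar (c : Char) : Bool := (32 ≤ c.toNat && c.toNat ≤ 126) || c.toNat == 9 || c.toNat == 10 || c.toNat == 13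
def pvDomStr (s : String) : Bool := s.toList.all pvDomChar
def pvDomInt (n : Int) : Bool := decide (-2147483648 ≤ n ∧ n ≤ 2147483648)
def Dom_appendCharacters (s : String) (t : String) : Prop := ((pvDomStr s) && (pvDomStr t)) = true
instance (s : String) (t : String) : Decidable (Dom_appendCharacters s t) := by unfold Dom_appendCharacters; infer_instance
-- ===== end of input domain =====

-- B iterates over t with str.find skipping forward in s, instead of A's per-character while loop over s; same value, proved equal.

-- ===== PORT A =====
-- A's while loop: idxS walks s, idxT advances on a match; result is tSize - final idxT.
-- We recurse on s's character list, carrying t's unmatched suffix; the value returned is the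
-- number of idxT increments (final idxT), subtracted from tSize at the end as in A.
def pvGoA : List Char → List Char → Nat
  | [], _ => 0
  | _ :: _, [] => 0
  | c :: cs, u :: us => if c = u then pvGoA cs us + 1 else pvGoA cs (u :: us)

def appendCharacters (s : String) (t : String) : Int :=
  (t.toList.length : Int) - (pvGoA s.toList t.toList : Int)

-- ===== PORT B =====
-- s.find(c, pos): scanning s from pos for c; the dropped prefix s[:pos] is represented by
-- passing the remaining suffix s[pos:]. Returns the suffix after the found occurrence
-- (i.e. s[idx+1:], the new pos), or none when find returns -1. Exact on all inputs.
def pvFindAfter (c : Char) : List Char → Option (List Char)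
  | [] => none
  | x :: xs => if x = c then some xs else pvFindAfter c xs

-- B's for-loop over t: matched counter, cursor pos into s (carried as the suffix s[pos:]);
-- break when find fails. Returns the final matched count.
def pvGoB : List Char → List Char → Nat
  | _, [] => 0
  | cs, u :: us =>
    match pvFindAfter u cs with
    | none => 0
    | some rest => pvGoB rest us + 1

def appendCharacters_alt (s : String) (t : String) : Int :=
  (t.toList.length : Int) - (pvGoB s.toList t.toList : Int)

-- ===== PRECONDITION & SPEC =====
def Spec_appendCharacters (s : String) (t : String) (out : Int) : Prop := out = appendCharacters_alt s t
instance (s : String) (t : String) (out : Int) : Decidable (Spec_appendCharacters s t out) := by unfold Spec_appendCharacters; infer_instance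

-- ===== CLAIM (what is proved, stated in full; the proofs are below) =====
def Claim_equal_appendCharacters : Prop := ∀ (s : String) (t : String), Dom_appendCharacters s t → Spec_appendCharacters s t (appendCharacters s t)

-- ===== LEMMAS AND PROOFS =====
theorem pvGoA_eq_pvGoB : ∀ (cs ts : List Char), pvGoA cs ts = pvGoB cs ts := by
  intro cs
  induction cs with
  | nil => intro ts; cases ts <;> simp [pvGoA, pvGoB, pvFindAfter]
  | cons c cs ih =>
    intro ts
    cases ts with
    | nil => simp [pvGoA, pvGoB]
    | cons u us =>
      by_cases h : c = u
      · simp [pvGoA, pvGoB, pvFindAfter, h, ih us]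
      · simp [pvGoA, pvGoB, pvFindAfter, h, ih (u :: us)]

-- ===== VERDICT (by name: the statement is the Claim_ definition above) =====
theorem appendCharacters_spec : Claim_equal_appendCharacters := by
  intro s t _
  unfold Spec_appendCharacters appendCharacters appendCharacters_alt
  rw [pvGoA_eq_pvGoB]
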